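-- pv_equiv track=rewrite | github.com/daniel-reich/ubiquitous-fiesta | bJxNHk7aovkx8Q776_7.py | gold_distribution
-- ===== SOURCE A (Python) =====
-- def gold_distribution(gold):
--     res, idx = [0, 0], 0
--     while gold:
--         if gold[0] >= gold[-1]:
--             res[idx] += gold[0]
--             gold = gold[1:]
--         else:
--             res[idx] += gold[-1]
--             gold = gold[:-1]
--         idx = 1 - idx
--     return res
-- ===== SOURCE B (Python) =====
-- def gold_distribution(gold):
--     r0, r1 = 0, 0
--     i, j = 0, len(gold) - 1
--     idx = 0
--     while i <= j:
--         if gold[i] >= gold[j]: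
--             v = gold[i]
--             i += 1
--         else:
--             v = gold[j]
--             j -= 1
--         if idx == 0:
--             r0 += v
--         else:
--             r1 += v
--         idx = 1 - idx
--     return [r0, r1]
-- ===== Notes on version B (the rewrite author's own statement) =====
-- stated objective: faster
-- what changed: Replaces the copy-on-every-step slicing loop (gold = gold[1:] / gold[:-1]) with a two-pointer scan over the original list, accumulating the two totals in scalars.
import Mathlib
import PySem

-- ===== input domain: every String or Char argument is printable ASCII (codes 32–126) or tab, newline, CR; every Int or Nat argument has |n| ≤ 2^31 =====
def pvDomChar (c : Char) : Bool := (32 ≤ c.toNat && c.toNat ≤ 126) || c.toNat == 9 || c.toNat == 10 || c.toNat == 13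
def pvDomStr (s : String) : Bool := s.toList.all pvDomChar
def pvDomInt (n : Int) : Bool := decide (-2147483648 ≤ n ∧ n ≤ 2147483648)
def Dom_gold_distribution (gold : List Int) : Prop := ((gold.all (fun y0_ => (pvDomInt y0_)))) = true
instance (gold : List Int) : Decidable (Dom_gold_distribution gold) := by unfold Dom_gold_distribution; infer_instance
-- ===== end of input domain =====

-- B replaces A's copy-on-every-step slicing loop with a two-pointer scan over the
-- original list, accumulating the two totals in scalars (objective: faster).

-- ===== PORT A =====
-- A's while loop; res is the pair (res[0], res[1]) of the two-element list res,
-- gold[0] is the head x, gold[-1] is PySem.List.pyGetD _ (-1) _ (in range: list nonempty),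
-- gold[1:] = tail (= xs), gold[:-1] = dropLast (both exact on a nonempty list).
def goldA_loop : List Int → Int × Int → Int → Int × Int
  | [], res, _ => res
  | x :: xs, (r0, r1), idx =>
    let last := PySem.List.pyGetD (x :: xs) (-1) 0
    if x ≥ last then
      goldA_loop xs (if idx = 0 then (r0 + x, r1) else (r0, r1 + x)) (1 - idx)
    else
      goldA_loop ((x :: xs).dropLast) (if idx = 0 then (r0 + last, r1) else (r0, r1 + last)) (1 - idx)
  termination_by l => l.length
  decreasing_by all_goals simp

def gold_distribution (gold : List Int) : List Int :=
  let res := goldA_loop gold (0, 0) 0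
  [res.1, res.2]

-- ===== PORT B =====
-- Source B's 'while i <= j' loop; gold[i] and gold[j] are always in range there
-- (0 ≤ i ≤ j < len), so pyGetD's default is never used.
def goldB_loop (gold : List Int) (i j : Int) (r0 r1 : Int) (idx : Int) : Int × Int :=
  if _h : i ≤ j then
    let gi := PySem.List.pyGetD gold i 0
    let gj := PySem.List.pyGetD gold j 0
    if gi ≥ gj then
      goldB_loop gold (i + 1) j (if idx = 0 then r0 + gi else r0) (if idx = 0 then r1 else r1 + gi) (1 - idx)
    else
      goldB_loop gold i (j - 1) (if idx = 0 then r0 + gj else r0) (if idx = 0 then r1 else r1 + gj) (1 - idx)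
  else (r0, r1)
  termination_by (j + 1 - i).toNat
  decreasing_by all_goals omega

def gold_distribution_alt (gold : List Int) : List Int :=
  let res := goldB_loop gold 0 ((gold.length : Int) - 1) 0 0 0
  [res.1, res.2]

-- ===== PRECONDITION & SPEC =====
def Spec_gold_distribution (gold : List Int) (out : List Int) : Prop := out = gold_distribution_alt gold
instance (gold : List Int) (out : List Int) : Decidable (Spec_gold_distribution gold out) := by unfold Spec_gold_distribution; infer_instance

-- ===== CLAIM (what is proved, stated in full; the proofs are below) =====
def Claim_equal_gold_distribution : Prop := ∀ (gold : List Int), Dom_gold_distribution gold → Spec_gold_distribution gold (gold_distribution gold)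

-- ===== LEMMAS AND PROOFS =====

-- The window [i, j] of gold, as the sublist A's loop works on.
theorem seg_cons (gold : List Int) (i j : Int) (hi : 0 ≤ i) (hij : i ≤ j) (hj : j < (gold.length : Int)) :
    (gold.drop i.toNat).take (j + 1 - i).toNat
      = gold[i.toNat]'(by omega) :: (gold.drop (i.toNat + 1)).take (j - i).toNat := by
  rw [List.drop_eq_getElem_cons (by omega), show (j + 1 - i).toNat = (j - i).toNat + 1 by omega,
    List.take_succ_cons]

theorem seg_last (gold : List Int) (i j : Int) (hi : 0 ≤ i) (hij : i ≤ j) (hj : j < (gold.length : Int)) :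
    PySem.List.pyGetD ((gold.drop i.toNat).take (j + 1 - i).toNat) (-1) 0
      = gold[j.toNat]'(by omega) := by
  have hne : (gold.drop i.toNat).take (j + 1 - i).toNat ≠ [] := by
    simp; omega
  rw [PySem.List.pyGetD_neg_one _ 0 hne]
  have h2 : ((gold.drop i.toNat).take (j + 1 - i).toNat).getLast? = some (gold[j.toNat]'(by omega)) := by
    rw [List.getLast?_eq_getElem?]
    have hlen : ((gold.drop i.toNat).take (j + 1 - i).toNat).length = (j + 1 - i).toNat := by
      simp; omega
    rw [hlen, List.getElem?_take, if_pos (by omega), List.getElem?_drop]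
    rw [show i.toNat + ((j + 1 - i).toNat - 1) = j.toNat by omega]
    exact List.getElem?_eq_getElem (by omega)
  rw [List.getLast?_eq_some_getLast hne] at h2
  exact Option.some.inj h2

theorem seg_dropLast (gold : List Int) (i j : Int) (hi : 0 ≤ i) (hij : i ≤ j) (hj : j < (gold.length : Int)) :
    ((gold.drop i.toNat).take (j + 1 - i).toNat).dropLast
      = (gold.drop i.toNat).take (j - i).toNat := by
  have hlen : ((gold.drop i.toNat).take (j + 1 - i).toNat).length = (j + 1 - i).toNat := by
    simp; omega
  rw [List.dropLast_eq_take, hlen, List.take_take]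
  congr 1
  omega

-- B's componentwise updates of (r0, r1) are A's pair-valued update.
theorem pair_if (r0 r1 v idx : Int) :
    ((if idx = 0 then r0 + v else r0), (if idx = 0 then r1 else r1 + v))
      = if idx = 0 then (r0 + v, r1) else (r0, r1 + v) := by
  by_cases h : idx = 0 <;> simp [h]

-- B's loop on the window [i, j] computes what A's loop computes on the sublist
-- (gold.drop i).take (j + 1 - i).
theorem goldB_loop_eq (gold : List Int) (i j : Int) (r0 r1 : Int) (idx : Int) :
    0 ≤ i → j < (gold.length : Int) →
    goldB_loop gold i j r0 r1 idx
      = goldA_loop ((gold.drop i.toNat).take (j + 1 - i).toNat) (r0, r1) idx := by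
  fun_induction goldB_loop gold i j r0 r1 idx with
  | case1 i j r0 r1 idx h gi gj hge ih =>
    intro hi hj
    simp only [dite_eq_ite] at ih
    have hgi : gi = gold[i.toNat]'(by omega) := PySem.List.pyGetD_eq_getElem gold 0 hi (by omega)
    have hgj : gj = gold[j.toNat]'(by omega) := PySem.List.pyGetD_eq_getElem gold 0 (by omega) hj
    have hlast := seg_last gold i j hi h hj
    have hcond : (gold[i.toNat]'(by omega) : Int) ≥ gold[j.toNat]'(by omega) := by
      rw [hgi, hgj] at hge; exact hge
    rw [ih (by omega) hj, pair_if, seg_cons gold i j hi h hj]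
    rw [seg_cons gold i j hi h hj] at hlast
    rw [goldA_loop, hlast]
    simp only [if_pos hcond]
    rw [show (i + 1).toNat = i.toNat + 1 by omega, show (j + 1 - (i + 1)).toNat = (j - i).toNat by omega,
      hgi]
  | case2 i j r0 r1 idx h gi gj hge ih =>
    intro hi hj
    simp only [dite_eq_ite] at ih
    have hgi : gi = gold[i.toNat]'(by omega) := PySem.List.pyGetD_eq_getElem gold 0 hi (by omega)
    have hgj : gj = gold[j.toNat]'(by omega) := PySem.List.pyGetD_eq_getElem gold 0 (by omega) hj
    have hlast := seg_last gold i j hi h hj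
    have hdl := seg_dropLast gold i j hi h hj
    have hcond : ¬ (gold[i.toNat]'(by omega) : Int) ≥ gold[j.toNat]'(by omega) := by
      rw [hgi, hgj] at hge; exact hge
    rw [ih hi (by omega), pair_if, show (j - 1 + 1 - i).toNat = (j - i).toNat by omega, ← hdl,
      seg_cons gold i j hi h hj]
    rw [seg_cons gold i j hi h hj] at hlast
    rw [goldA_loop, hlast]
    simp only [if_neg hcond]
    rw [hgj]
  | case3 i j r0 r1 idx h =>
    intro hi hj
    rw [show (j + 1 - i).toNat = 0 by omega]
    simp [goldA_loop]

-- ===== VERDICT (by name: the statement is the Claim_ definition above) =====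
theorem gold_distribution_spec : Claim_equal_gold_distribution := by
  intro gold _
  unfold Spec_gold_distribution gold_distribution gold_distribution_alt
  rw [goldB_loop_eq gold 0 ((gold.length : Int) - 1) 0 0 0 (by omega) (by omega)]
  simp
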